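-- pv_equiv track=rewrite | github.com/julesmrt/Algorithmic-complexity | part1/ex01/snowplow.py | greedy_order
-- ===== SOURCE A (Python) =====
-- def greedy_order(houses):
--     remaining_houses = houses[:]
--     current_position = 0
--     order = []
--     while remaining_houses:
--         next_house = min(remaining_houses, key=lambda x: abs(x - current_position))
--         order.append(next_house)
--         current_position = next_house
--         remaining_houses.remove(next_house)
--     return order
-- ===== SOURCE B (Python) =====
-- def greedy_order(houses):
--     # One pass: first-occurrence index and multiplicity of each value.
--     first = {}
--     count = {}
--     for idx, v in enumerate(houses):
--         if v not in first:
--             first[v] = idx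
--         count[v] = count.get(v, 0) + 1
--     vs = sorted(count)
--     # j = first sorted value >= 0; i = last sorted value < 0.
--     j = 0
--     while j < len(vs) and vs[j] < 0:
--         j += 1
--     i = j - 1
--     p = 0
--     order = []
--     # Two-pointer expansion: the nearest remaining house is always the
--     # innermost unvisited value on one of the two sides; ties go to the
--     # value whose first occurrence in `houses` comes earlier, and all
--     # duplicates of a value are visited consecutively.
--     while i >= 0 or j < len(vs):
--         if i < 0:
--             take_left = False
--         elif j >= len(vs):
--             take_left = True
--         else:
--             dl = p - vs[i]
--             dr = vs[j] - p
--             take_left = dl < dr or (dl == dr and first[vs[i]] < first[vs[j]])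
--         v = vs[i] if take_left else vs[j]
--         order += [v] * count[v]
--         p = v
--         if take_left:
--             i -= 1
--         else:
--             j += 1
--     return order
-- ===== Notes on version B (the rewrite author's own statement) =====
-- stated objective: faster
-- what changed: Replaces the O(n^2) repeated min-scan+remove over the remaining list by sorting the distinct values once and expanding two pointers outward from 0, emitting each value's duplicates as a block and breaking distance ties by first-occurrence index.
import Mathlib
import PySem

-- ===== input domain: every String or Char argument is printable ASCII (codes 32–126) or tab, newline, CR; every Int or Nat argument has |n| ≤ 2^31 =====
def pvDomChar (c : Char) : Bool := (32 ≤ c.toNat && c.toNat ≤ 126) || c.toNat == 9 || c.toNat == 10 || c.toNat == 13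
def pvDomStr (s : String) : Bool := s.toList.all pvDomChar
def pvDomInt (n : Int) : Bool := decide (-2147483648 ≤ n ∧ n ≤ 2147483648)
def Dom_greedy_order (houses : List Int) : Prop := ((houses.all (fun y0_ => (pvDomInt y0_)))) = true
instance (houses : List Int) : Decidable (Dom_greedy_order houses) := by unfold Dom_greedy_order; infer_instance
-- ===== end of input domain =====

-- B replaces A's quadratic min-scan-and-remove loop by sorting the distinct values once
-- and expanding two pointers outward from 0 (objective: faster).

-- ===== PORT A =====
-- while remaining_houses: pick min by |x - current|, append, remove (first occurrence).
-- The loop removes one element per iteration, so fuel = initial length runs it to completion.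
def greedyGoA : Nat → List Int → Int → List Int
  | 0, _, _ => []
  | fuel + 1, r, p =>
    if r = [] then []
    else
      let v := (PySem.List.min? r (fun x => |x - p|)).getD 0
      v :: greedyGoA fuel ((PySem.List.remove? r v).getD []) v

def greedy_order (houses : List Int) : List Int := greedyGoA houses.length houses 0

-- ===== PORT B =====
-- while j < len(vs) and vs[j] < 0: j += 1  (advances at most len(vs) times)
def findJ : Nat → List Int → Nat → Nat
  | 0, _, j => j
  | fuel + 1, vs, j =>
    if j < vs.length ∧ vs.getD j 0 < 0 then findJ fuel vs (j + 1) else j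

-- the main two-pointer loop of Source B (one distinct value consumed per iteration)
def greedyGoB : Nat → List Int → PySem.Dict Int Int → PySem.Dict Int Int → Int → Nat → Int → List Int
  | 0, _, _, _, _, _, _ => []
  | fuel + 1, vs, first, count, i, j, p =>
    if 0 ≤ i ∨ j < vs.length then
      let takeLeft : Bool :=
        if i < 0 then false
        else if vs.length ≤ j then true
        else
          let dl := p - vs.getD i.toNat 0
          let dr := vs.getD j 0 - p
          decide (dl < dr) ||
            (decide (dl = dr) && decide (first.getD (vs.getD i.toNat 0) 0 < first.getD (vs.getD j 0) 0))
      if takeLeft then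
        let v := vs.getD i.toNat 0
        List.replicate (count.getD v 0).toNat v ++ greedyGoB fuel vs first count (i - 1) j v
      else
        let v := vs.getD j 0
        List.replicate (count.getD v 0).toNat v ++ greedyGoB fuel vs first count i (j + 1) v
    else []

def greedy_order_alt (houses : List Int) : List Int :=
  let fc := (PySem.List.enumerate houses).foldl
      (fun s iv =>
        (if s.1.contains iv.2 then s.1 else s.1.insert iv.2 iv.1,
         s.2.insert iv.2 (s.2.getD iv.2 0 + 1)))
      (PySem.Dict.empty, PySem.Dict.empty)
  let vs := PySem.List.sorted (PySem.Dict.keys fc.2) (fun x => x) false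
  let j0 := findJ vs.length vs 0
  greedyGoB (vs.length + 1) vs fc.1 fc.2 ((j0 : Int) - 1) j0 0

-- ===== PRECONDITION & SPEC =====
def Spec_greedy_order (houses : List Int) (out : List Int) : Prop := out = greedy_order_alt houses
instance (houses : List Int) (out : List Int) : Decidable (Spec_greedy_order houses out) := by unfold Spec_greedy_order; infer_instance

-- ===== CLAIM (what is proved, stated in full; the proofs are below) =====
def Claim_equal_greedy_order : Prop := ∀ (houses : List Int), Dom_greedy_order houses → Spec_greedy_order houses (greedy_order houses)

-- ===== LEMMAS AND PROOFS =====

def minStep (key : Int → Int) (m y : Int) : Int := if key y < key m then y else m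

theorem min?_cons (key : Int → Int) : ∀ (t : List Int) (x : Int),
    PySem.List.min? (x :: t) key = some (t.foldl (minStep key) x) := by
  intro t
  induction t with
  | nil => intro x; rfl
  | cons y t ih =>
    intro x
    have h1 : PySem.List.min? (x :: y :: t) key
        = PySem.List.min? (minStep key x y :: t) key := by
      simp only [PySem.List.min?, List.foldl_cons, minStep]
      by_cases h : key y < key x <;> simp [h]
    rw [h1, ih]
    simp [List.foldl_cons]

theorem foldl_min_keep (key : Int → Int) : ∀ (t : List Int) (b : Int),
    (∀ y ∈ t, ¬ key y < key b) → t.foldl (minStep key) b = b := by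
  intro t
  induction t with
  | nil => intro b _; rfl
  | cons y t ih =>
    intro b h
    simp only [List.foldl_cons, minStep, if_neg (h y (by simp))]
    exact ih b fun z hz => h z (by simp [hz])

theorem foldl_min_find (key : Int → Int) : ∀ (t : List Int) (b d w : Int),
    (∀ y ∈ t, d ≤ key y) → d < key b →
    t.find? (fun y => key y == d) = some w →
    t.foldl (minStep key) b = w := by
  intro t
  induction t with
  | nil => intro b d w _ _ hf; simp at hf
  | cons y t ih =>
    intro b d w hlb hb hf
    by_cases hy : key y = d
    · rw [List.find?_cons_of_pos (by simp [hy])] at hf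
      obtain rfl : y = w := Option.some_inj.mp hf
      simp only [List.foldl_cons, minStep, if_pos (show key y < key b by omega)]
      exact foldl_min_keep key t y fun z hz => by
        have := hlb z (by simp [hz]); omega
    · rw [List.find?_cons_of_neg (by simp [hy])] at hf
      have hdy : d < key y := by have := hlb y (by simp); omega
      simp only [List.foldl_cons, minStep]
      by_cases h : key y < key b
      · simp only [if_pos h]
        exact ih y d w (fun z hz => hlb z (by simp [hz])) hdy hf
      · simp only [if_neg h]
        exact ih b d w (fun z hz => hlb z (by simp [hz])) hb hf

theorem min?_of_find? (key : Int → Int) (r : List Int) (d w : Int)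
    (hlb : ∀ y ∈ r, d ≤ key y)
    (hf : r.find? (fun y => key y == d) = some w) :
    PySem.List.min? r key = some w := by
  cases r with
  | nil => simp at hf
  | cons x t =>
    rw [min?_cons]
    by_cases hx : key x = d
    · rw [List.find?_cons_of_pos (by simp [hx])] at hf
      obtain rfl : x = w := Option.some_inj.mp hf
      rw [foldl_min_keep key t x fun z hz => by
        have := hlb z (by simp [hz]); omega]
    · rw [List.find?_cons_of_neg (by simp [hx])] at hf
      have hdx : d < key x := by have := hlb x (by simp); omega
      rw [foldl_min_find key t x d w (fun z hz => hlb z (by simp [hz])) hdx hf]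

theorem find?_congr_mem {α : Type} (p q : α → Bool) : ∀ (l : List α),
    (∀ x ∈ l, p x = q x) → l.find? p = l.find? q := by
  intro l
  induction l with
  | nil => intro _; rfl
  | cons x t ih =>
    intro h
    by_cases hx : p x = true
    · rw [List.find?_cons_of_pos hx, List.find?_cons_of_pos (by rw [← h x (by simp)]; exact hx)]
    · rw [List.find?_cons_of_neg (by simpa using hx),
        List.find?_cons_of_neg (by rw [← h x (by simp)]; simpa using hx)]
      exact ih fun z hz => h z (by simp [hz])

theorem find?_unique (key : Int → Int) (d v : Int) : ∀ (r : List Int),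
    v ∈ r → key v = d → (∀ x ∈ r, key x = d → x = v) →
    r.find? (fun y => key y == d) = some v := by
  intro r
  induction r with
  | nil => intro h; simp at h
  | cons x t ih =>
    intro hv hd hu
    by_cases hx : key x = d
    · have hxv : x = v := hu x (by simp) hx
      rw [List.find?_cons_of_pos (by simp [hx]), hxv]
    · rw [List.find?_cons_of_neg (by simp [hx])]
      have hvt : v ∈ t := by
        rcases List.mem_cons.mp hv with h | h
        · exact absurd (h ▸ hd) hx
        · exact h
      exact ih hvt hd fun z hz => hu z (by simp [hz])

theorem sel_unique (key : Int → Int) (r : List Int) (v : Int)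
    (hv : v ∈ r) (hu : ∀ x ∈ r, x ≠ v → key v < key x) :
    PySem.List.min? r key = some v := by
  apply min?_of_find? key r (key v)
  · intro y hy
    by_cases h : y = v
    · simp [h]
    · exact le_of_lt (hu y hy h)
  · exact find?_unique key (key v) v r hv rfl fun x hx hxd => by
      by_contra hne
      have := hu x hx hne; omega

theorem firstOf (a b : Int) (hne : a ≠ b) : ∀ (l : List Int),
    a ∈ l → b ∈ l → l.idxOf a < l.idxOf b →
    l.find? (fun x => (x == a) || (x == b)) = some a := by
  intro l
  induction l with
  | nil => intro h; simp at h
  | cons x t ih =>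
    intro ha hb hidx
    rcases eq_or_ne x a with rfl | hxa
    · rw [List.find?_cons_of_pos (by simp)]
    · rcases eq_or_ne x b with rfl | hxb
      · rw [List.idxOf_cons_self] at hidx; omega
      · rw [List.find?_cons_of_neg (by simp [hxa, hxb])]
        have ha' : a ∈ t := by
          rcases List.mem_cons.mp ha with h | h
          · exact absurd h.symm hxa
          · exact h
        have hb' : b ∈ t := by
          rcases List.mem_cons.mp hb with h | h
          · exact absurd h.symm hxb
          · exact h
        apply ih ha' hb'
        rw [List.idxOf_cons_ne t hxa, List.idxOf_cons_ne t hxb] at hidx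
        omega

theorem sel_tie (key : Int → Int) (a b : Int) (hs : List Int) (q : Int → Bool)
    (ha : q a = true) (hb : q b = true) (hamem : a ∈ hs) (hbmem : b ∈ hs)
    (hne : a ≠ b) (hab : key a = key b)
    (hu : ∀ x, x ∈ hs.filter q → x ≠ a → x ≠ b → key a < key x)
    (hidx : hs.idxOf a < hs.idxOf b) :
    PySem.List.min? (hs.filter q) key = some a := by
  apply min?_of_find? key _ (key a)
  · intro y hy
    rcases eq_or_ne y a with rfl | h1
    · omega
    rcases eq_or_ne y b with rfl | h2
    · omega
    · exact le_of_lt (hu y hy h1 h2)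
  · have h1 : (hs.filter q).find? (fun y => key y == key a)
        = (hs.filter q).find? (fun x => (x == a) || (x == b)) := by
      apply find?_congr_mem
      intro x hx
      rcases eq_or_ne x a with rfl | h1
      · simp
      rcases eq_or_ne x b with rfl | h2
      · simp [← hab]
      · have := hu x hx h1 h2
        rw [Bool.eq_iff_iff]
        constructor
        · intro h; exfalso; simp at h; omega
        · intro h; simp [h1, h2] at h
    rw [h1, List.find?_filter]
    have h2 : hs.find? (fun x => decide (q x = true ∧ ((x == a) || (x == b)) = true))
        = hs.find? (fun x => (x == a) || (x == b)) := by
      apply find?_congr_mem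
      intro x hx
      rw [Bool.eq_iff_iff]
      constructor
      · intro h; simp at h; simp [h]
      · intro h
        rcases (by simpa using h : x = a ∨ x = b) with rfl | rfl <;> simp [ha, hb]
    rw [h2]
    exact firstOf a b hne hs hamem hbmem hidx

theorem goA_cons (fuel : Nat) (r : List Int) (p v : Int) (hne : r ≠ [])
    (hmin : PySem.List.min? r (fun x => |x - p|) = some v) :
    greedyGoA (fuel + 1) r p = v :: greedyGoA fuel (r.erase v) v := by
  simp only [greedyGoA, if_neg hne]
  simp only [hmin, Option.getD_some,
    PySem.List.remove?_eq_some_erase r v (PySem.List.min?_mem hmin)]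

theorem goA_fuel_irrel : ∀ (f1 f2 : Nat) (r : List Int) (p : Int),
    r.length ≤ f1 → r.length ≤ f2 → greedyGoA f1 r p = greedyGoA f2 r p := by
  intro f1
  induction f1 with
  | zero =>
    intro f2 r p h1 _
    obtain rfl : r = [] := List.eq_nil_of_length_eq_zero (by omega)
    cases f2 with
    | zero => rfl
    | succ m => simp [greedyGoA]
  | succ n ih =>
    intro f2 r p h1 h2
    rcases eq_or_ne r [] with rfl | hne
    · cases f2 with
      | zero => simp [greedyGoA]
      | succ m => simp [greedyGoA]
    · cases f2 with
      | zero =>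
        exact absurd (List.eq_nil_of_length_eq_zero (by omega)) hne
      | succ m =>
        obtain ⟨v, hmin⟩ := Option.ne_none_iff_exists'.mp
          (fun h => hne ((PySem.List.min?_eq_none_iff r (fun x => |x - p|)).mp h))
        have hvm := PySem.List.min?_mem hmin
        have hle : (r.erase v).length = r.length - 1 := List.length_erase_of_mem hvm
        have hlen0 : r.length ≠ 0 := fun h => hne (List.eq_nil_of_length_eq_zero h)
        rw [goA_cons n r p v hne hmin, goA_cons m r p v hne hmin]
        rw [ih m (r.erase v) v (by omega) (by omega)]

theorem erase_filter (v : Int) : ∀ (r : List Int),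
    (r.erase v).filter (fun x => x ≠ v) = r.filter (fun x => x ≠ v) := by
  intro r
  induction r with
  | nil => rfl
  | cons x t ih =>
    rcases eq_or_ne x v with rfl | hxv
    · simp [List.erase_cons]
    · have h2 := ih
      simp only [ne_eq, decide_not] at h2
      simp [List.erase_cons, hxv, h2]

theorem consume : ∀ (n : Nat) (r : List Int), r.length ≤ n → ∀ v : Int,
    greedyGoA n r v = List.replicate (r.count v) v
      ++ greedyGoA (r.filter (fun x => x ≠ v)).length (r.filter (fun x => x ≠ v)) v := by
  intro n
  induction n with
  | zero =>
    intro r h v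
    have : r = [] := List.eq_nil_of_length_eq_zero (by omega)
    subst this; simp [greedyGoA]
  | succ n ih =>
    intro r hlen v
    by_cases hv : v ∈ r
    · have hne : r ≠ [] := by rintro rfl; simp at hv
      have hmin : PySem.List.min? r (fun x => |x - v|) = some v := by
        apply sel_unique _ r v hv
        intro x hx hxv
        have h1 : (0:Int) < |x - v| := abs_pos.mpr (sub_ne_zero.mpr hxv)
        simpa [sub_self] using h1
      rw [goA_cons n r v v hne hmin,
        ih (r.erase v) (by have := List.length_erase_of_mem hv; omega) v,
        erase_filter, List.count_erase_self]
      have hpos : 0 < r.count v := List.count_pos_iff.mpr hv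
      cases hcnt : r.count v with
      | zero => omega
      | succ m => simp [List.replicate_succ]
    · have h0 : r.count v = 0 := List.count_eq_zero.mpr hv
      have hfil : r.filter (fun x => x ≠ v) = r :=
        List.filter_eq_self.mpr (fun a ha => by
          simp only [decide_eq_true_eq]
          rintro rfl; exact hv ha)
      rw [h0, hfil]
      simp only [List.replicate_zero, List.nil_append]
      exact goA_fuel_irrel (n+1) r.length r v hlen le_rfl

theorem step_all (fuel : Nat) (r : List Int) (p v : Int) (hlen : r.length ≤ fuel)
    (hne : r ≠ []) (hmin : PySem.List.min? r (fun x => |x - p|) = some v) :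
    greedyGoA fuel r p = List.replicate (r.count v) v
      ++ greedyGoA (r.filter (fun x => x ≠ v)).length (r.filter (fun x => x ≠ v)) v := by
  have hv : v ∈ r := PySem.List.min?_mem hmin
  cases fuel with
  | zero => exact absurd (List.eq_nil_of_length_eq_zero (by omega)) hne
  | succ f =>
    rw [goA_cons f r p v hne hmin]
    rw [goA_fuel_irrel f (r.erase v).length (r.erase v) v
      (by have := List.length_erase_of_mem hv; omega) le_rfl]
    rw [consume (r.erase v).length (r.erase v) le_rfl v, erase_filter,
      List.count_erase_self]
    have hpos : 0 < r.count v := List.count_pos_iff.mpr hv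
    cases hcnt : r.count v with
    | zero => omega
    | succ m => simp [List.replicate_succ]

def inS (vs : List Int) (li j : Nat) (x : Int) : Bool :=
  (vs.take li).contains x || (vs.drop j).contains x

theorem inS_iff (vs : List Int) (li j : Nat) (x : Int) :
    inS vs li j x = true ↔ ∃ k, ∃ hk : k < vs.length, vs[k] = x ∧ (k < li ∨ j ≤ k) := by
  unfold inS
  simp only [Bool.or_eq_true, List.contains_iff_mem]
  constructor
  · rintro (h | h)
    · obtain ⟨k, hk, hkx⟩ := List.mem_take_iff_getElem.mp h
      exact ⟨k, by omega, by simpa using hkx, Or.inl (by omega)⟩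
    · obtain ⟨i, hi, hix⟩ := List.mem_iff_getElem.mp h
      have hlen : i < vs.length - j := by simpa using hi
      refine ⟨j + i, by omega, ?_, Or.inr (by omega)⟩
      rw [← hix, List.getElem_drop]
  · rintro ⟨k, hk, rfl, hcase⟩
    rcases hcase with h | h
    · left
      exact List.mem_take_iff_getElem.mpr ⟨k, by omega, rfl⟩
    · right
      apply List.mem_iff_getElem.mpr
      refine ⟨k - j, by simp; omega, ?_⟩
      rw [List.getElem_drop]
      congr 1; omega

theorem smono (vs : List Int) (h : vs.Pairwise (· < ·)) {k l : Nat}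
    (hk : k < vs.length) (hl : l < vs.length) (hkl : k < l) : vs[k] < vs[l] :=
  List.pairwise_iff_getElem.mp h k l hk hl hkl

theorem filter_left (hs vs : List Int) (hsorted : vs.Pairwise (· < ·)) (li j : Nat)
    (hli : 1 ≤ li) (hlij : li ≤ j) (hjlen : j ≤ vs.length) (hlen : li - 1 < vs.length) :
    (hs.filter (fun x => inS vs li j x)).filter (fun x => x ≠ vs[li-1])
      = hs.filter (fun x => inS vs (li-1) j x) := by
  rw [List.filter_filter]
  apply List.filter_congr
  intro x hx
  rw [Bool.eq_iff_iff]
  simp only [Bool.and_eq_true, inS_iff, decide_eq_true_eq, ne_eq, Bool.not_eq_true',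
    decide_eq_false_iff_not]
  constructor
  · rintro ⟨hnev, k, hk, rfl, hcase⟩
    rcases hcase with h | h
    · refine ⟨k, hk, rfl, Or.inl ?_⟩
      rcases Nat.lt_or_ge k (li - 1) with h2 | h2
      · exact h2
      · exfalso
        have hkeq : k = li - 1 := by omega
        subst hkeq
        exact hnev rfl
    · exact ⟨k, hk, rfl, Or.inr h⟩
  · rintro ⟨k, hk, rfl, hcase⟩
    rcases hcase with h | h
    · have hne : vs[k] ≠ vs[li-1] := ne_of_lt (smono vs hsorted hk hlen (by omega))
      exact ⟨hne, k, hk, rfl, Or.inl (by omega)⟩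
    · have hne : vs[li-1] < vs[k] := smono vs hsorted hlen hk (by omega)
      exact ⟨ne_of_gt hne, k, hk, rfl, Or.inr h⟩

theorem filter_right (hs vs : List Int) (hsorted : vs.Pairwise (· < ·)) (li j : Nat)
    (hlij : li ≤ j) (hjlen : j < vs.length) :
    (hs.filter (fun x => inS vs li j x)).filter (fun x => x ≠ vs[j])
      = hs.filter (fun x => inS vs li (j+1) x) := by
  rw [List.filter_filter]
  apply List.filter_congr
  intro x hx
  rw [Bool.eq_iff_iff]
  simp only [Bool.and_eq_true, inS_iff, decide_eq_true_eq, ne_eq, Bool.not_eq_true',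
    decide_eq_false_iff_not]
  constructor
  · rintro ⟨hnev, k, hk, rfl, hcase⟩
    rcases hcase with h | h
    · exact ⟨k, hk, rfl, Or.inl h⟩
    · refine ⟨k, hk, rfl, Or.inr ?_⟩
      rcases Nat.lt_or_ge j k with h2 | h2
      · omega
      · exfalso
        have hkeq : k = j := by omega
        subst hkeq
        exact hnev rfl
  · rintro ⟨k, hk, rfl, hcase⟩
    rcases hcase with h | h
    · have hne : vs[k] < vs[j] := smono vs hsorted hk hjlen (by omega)
      exact ⟨ne_of_lt hne, k, hk, rfl, Or.inl h⟩
    · have hne : vs[j] < vs[k] := smono vs hsorted hjlen hk (by omega)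
      exact ⟨ne_of_gt hne, k, hk, rfl, Or.inr (by omega)⟩

theorem goA_goB (hs vs : List Int) (first count : PySem.Dict Int Int)
    (hsorted : vs.Pairwise (· < ·))
    (hmem : ∀ x : Int, x ∈ vs ↔ x ∈ hs)
    (hf : ∀ v ∈ hs, first.getD v 0 = (hs.idxOf v : Int))
    (hc : ∀ v ∈ hs, count.getD v 0 = (hs.count v : Int)) :
    ∀ (N li j : Nat) (p : Int), li + (vs.length - j) ≤ N → li ≤ j → j ≤ vs.length →
    (∀ (k : Nat) (hk : k < vs.length), k < li → vs[k] < p) →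
    (∀ (k : Nat) (hk : k < vs.length), j ≤ k → p ≤ vs[k]) →
    greedyGoA (hs.filter (fun x => inS vs li j x)).length (hs.filter (fun x => inS vs li j x)) p
      = greedyGoB N vs first count ((li : Int) - 1) j p := by
  intro N
  induction N with
  | zero =>
    intro li j p hN hlij hjlen _ _
    obtain rfl : li = 0 := by omega
    obtain rfl : j = vs.length := by omega
    rw [List.filter_eq_nil_iff.mpr (by intro a _; simp [inS])]
    rfl
  | succ N ih =>
    intro li j p hN hlij hjlen hl hr
    by_cases hbase : li = 0 ∧ j = vs.length
    · obtain ⟨rfl, rfl⟩ := hbase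
      rw [List.filter_eq_nil_iff.mpr (by intro a _; simp [inS])]
      simp only [greedyGoB, List.length_nil]
      rw [if_neg (by push_neg; exact ⟨by omega, by omega⟩)]
      simp [greedyGoA]
    have hguard : (0:Int) ≤ (li:Int) - 1 ∨ j < vs.length := by
      rcases Nat.eq_zero_or_pos li with h | h
      · rcases Nat.lt_or_ge j vs.length with h2 | h2
        · exact Or.inr h2
        · exact absurd ⟨h, by omega⟩ hbase
      · exact Or.inl (by omega)
    have rdec : ∀ x ∈ hs.filter (fun x => inS vs li j x),
        ∃ k, ∃ hk : k < vs.length, vs[k] = x ∧ (k < li ∨ j ≤ k) := by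
      intro x hx
      exact (inS_iff vs li j x).mp (List.of_mem_filter hx)
    have keyL : ∀ (k : Nat) (hk : k < vs.length), k < li → |vs[k] - p| = p - vs[k] := by
      intro k hk h
      have := hl k hk h
      rw [abs_of_nonpos (by omega)]; ring
    have keyR : ∀ (k : Nat) (hk : k < vs.length), j ≤ k → |vs[k] - p| = vs[k] - p := by
      intro k hk h
      have := hr k hk h
      rw [abs_of_nonneg (by omega)]
    rcases Nat.eq_zero_or_pos li with hli0 | hli1
    · -- C1 : li = 0, take right, unique winner vs[j]
      have hjn : j < vs.length := by
        rcases Nat.lt_or_ge j vs.length with h2 | h2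
        · exact h2
        · exact absurd ⟨hli0, by omega⟩ hbase
      have hvhs : vs[j] ∈ hs := (hmem _).mp (List.getElem_mem hjn)
      have hvS : inS vs li j (vs[j]) = true :=
        (inS_iff vs li j _).mpr ⟨j, hjn, rfl, Or.inr le_rfl⟩
      have hvr : vs[j] ∈ hs.filter (fun x => inS vs li j x) :=
        List.mem_filter.mpr ⟨hvhs, hvS⟩
      have hner : hs.filter (fun x => inS vs li j x) ≠ [] := by
        intro h; rw [h] at hvr; simp at hvr
      have hsel : PySem.List.min? (hs.filter (fun x => inS vs li j x)) (fun x => |x - p|)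
          = some (vs[j]) := by
        apply sel_unique _ _ _ hvr
        intro x hx hxv
        obtain ⟨k, hk, rfl, hcase⟩ := rdec x hx
        rcases hcase with h | h
        · omega
        · have hkj : j < k := by
            rcases Nat.lt_or_ge j k with h2 | h2
            · exact h2
            · exfalso; have : k = j := by omega
              subst this; exact hxv rfl
          rw [keyR j hjn le_rfl, keyR k hk (by omega)]
          have := smono vs hsorted hjn hk hkj
          omega
      simp only [greedyGoB]
      rw [if_pos hguard]
      rw [if_pos (show (li:Int) - 1 < 0 by omega)]
      simp only [Bool.false_eq_true, if_false]
      rw [List.getD_eq_getElem vs 0 hjn]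
      rw [step_all _ _ p (vs[j]) le_rfl hner hsel]
      rw [List.count_filter hvS]
      rw [filter_right hs vs hsorted li j (by omega) hjn]
      rw [ih li (j+1) (vs[j]) (by omega) (by omega) (by omega)
        (by intro k hk h; omega)
        (by intro k hk h; exact le_of_lt (smono vs hsorted hjn hk (by omega)))]
      rw [hc _ hvhs, Int.toNat_natCast]
    · -- li ≥ 1
      have hlen : li - 1 < vs.length := by omega
      have hAp : vs[li-1] < p := hl (li-1) hlen (by omega)
      have hAhs : vs[li-1] ∈ hs := (hmem _).mp (List.getElem_mem hlen)
      have hAS : inS vs li j (vs[li-1]) = true :=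
        (inS_iff vs li j _).mpr ⟨li-1, hlen, rfl, Or.inl (by omega)⟩
      have hAr : vs[li-1] ∈ hs.filter (fun x => inS vs li j x) :=
        List.mem_filter.mpr ⟨hAhs, hAS⟩
      have hner : hs.filter (fun x => inS vs li j x) ≠ [] := by
        intro h; rw [h] at hAr; simp at hAr
      have ihL := ih (li-1) j (vs[li-1]) (by omega) (by omega) (by omega)
        (by intro k hk h; exact smono vs hsorted hk hlen (by omega))
        (by intro k hk h; exact le_of_lt (smono vs hsorted hlen hk (by omega)))
      rw [show ((li - 1 : Nat) : Int) = (li:Int) - 1 from by omega] at ihL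
      have doLeft : PySem.List.min? (hs.filter (fun x => inS vs li j x)) (fun x => |x - p|)
            = some (vs[li-1]) →
          greedyGoA (hs.filter (fun x => inS vs li j x)).length (hs.filter (fun x => inS vs li j x)) p
            = List.replicate (hs.count (vs[li-1])) (vs[li-1])
              ++ greedyGoB N vs first count ((li:Int) - 1 - 1) j (vs[li-1]) := by
        intro hsel
        rw [step_all _ _ p (vs[li-1]) le_rfl hner hsel]
        rw [List.count_filter hAS]
        rw [filter_left hs vs hsorted li j (by omega) hlij hjlen hlen]
        rw [ihL]
      rcases Nat.lt_or_ge j vs.length with hjn | hjn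
      · -- C3 : both sides present
        have hpB : p ≤ vs[j] := hr j hjn le_rfl
        have hBhs : vs[j] ∈ hs := (hmem _).mp (List.getElem_mem hjn)
        have hBS : inS vs li j (vs[j]) = true :=
          (inS_iff vs li j _).mpr ⟨j, hjn, rfl, Or.inr le_rfl⟩
        have hAB : vs[li-1] < vs[j] := smono vs hsorted hlen hjn (by omega)
        have doRight : PySem.List.min? (hs.filter (fun x => inS vs li j x)) (fun x => |x - p|)
              = some (vs[j]) →
            greedyGoA (hs.filter (fun x => inS vs li j x)).length (hs.filter (fun x => inS vs li j x)) p
              = List.replicate (hs.count (vs[j])) (vs[j])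
                ++ greedyGoB N vs first count ((li:Int) - 1) (j+1) (vs[j]) := by
          intro hsel
          rw [step_all _ _ p (vs[j]) le_rfl hner hsel]
          rw [List.count_filter hBS]
          rw [filter_right hs vs hsorted li j hlij hjn]
          rw [ih li (j+1) (vs[j]) (by omega) (by omega) (by omega)
            (by intro k hk h; exact smono vs hsorted hk hjn (by omega))
            (by intro k hk h; exact le_of_lt (smono vs hsorted hjn hk (by omega)))]
        have hB0 : vs[j] ∈ hs.filter (fun x => inS vs li j x) :=
          List.mem_filter.mpr ⟨hBhs, hBS⟩
        -- unfold RHS once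
        simp only [greedyGoB]
        rw [if_pos hguard]
        rw [if_neg (by omega : ¬ ((li:Int) - 1 < 0)), if_neg (by omega : ¬ (vs.length ≤ j))]
        rw [show ((li:Int) - 1).toNat = li - 1 from by omega]
        rw [List.getD_eq_getElem vs 0 hlen, List.getD_eq_getElem vs 0 hjn]
        rcases lt_trichotomy (p - vs[li-1]) (vs[j] - p) with hcmp | hcmp | hcmp
        · -- dl < dr : take left, unique
          rw [if_pos (by
            simp only [Bool.or_eq_true, Bool.and_eq_true, decide_eq_true_eq]
            exact Or.inl hcmp)]
          have hsel : PySem.List.min? (hs.filter (fun x => inS vs li j x)) (fun x => |x - p|)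
              = some (vs[li-1]) := by
            apply sel_unique _ _ _ hAr
            intro x hx hxv
            obtain ⟨k, hk, rfl, hcase⟩ := rdec x hx
            rw [keyL (li-1) hlen (by omega)]
            rcases hcase with h | h
            · have hkli : k < li - 1 := by
                rcases Nat.lt_or_ge k (li-1) with h2 | h2
                · exact h2
                · exfalso; have : k = li - 1 := by omega
                  subst this; exact hxv rfl
              rw [keyL k hk (by omega)]
              have := smono vs hsorted hk hlen hkli
              omega
            · rw [keyR k hk h]
              have : vs[j] ≤ vs[k] := by
                rcases Nat.lt_or_ge j k with h2 | h2
                · exact le_of_lt (smono vs hsorted hjn hk h2)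
                · have : k = j := by omega
                  subst this; exact le_rfl
              omega
          rw [doLeft hsel, hc _ hAhs, Int.toNat_natCast]
        · -- dl = dr : tie, break by first occurrence
          have hd0 : (0:Int) < vs[j] - p := by omega
          have hABne : vs[li-1] ≠ vs[j] := ne_of_lt hAB
          have hidxA : hs.idxOf (vs[li-1]) < hs.length := List.idxOf_lt_length_of_mem hAhs
          have hidxB : hs.idxOf (vs[j]) < hs.length := List.idxOf_lt_length_of_mem hBhs
          have hidxne : hs.idxOf (vs[li-1]) ≠ hs.idxOf (vs[j]) := by
            intro h
            apply hABne
            have h1 : hs.getD (hs.idxOf (vs[li-1])) 0 = vs[li-1] := by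
              rw [List.getD_eq_getElem _ _ hidxA]
              exact List.getElem_idxOf hidxA
            have h2 : hs.getD (hs.idxOf (vs[j])) 0 = vs[j] := by
              rw [List.getD_eq_getElem _ _ hidxB]
              exact List.getElem_idxOf hidxB
            rw [← h1, ← h2, h]
          have hkeyA : |vs[li-1] - p| = p - vs[li-1] := keyL (li-1) hlen (by omega)
          have hkeyB : |vs[j] - p| = vs[j] - p := keyR j hjn le_rfl
          have hu2 : ∀ x ∈ hs.filter (fun x => inS vs li j x),
              x ≠ vs[li-1] → x ≠ vs[j] → |vs[li-1] - p| < |x - p| := by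
            intro x hx hxA hxB
            obtain ⟨k, hk, rfl, hcase⟩ := rdec x hx
            rw [hkeyA]
            rcases hcase with h | h
            · have hkli : k < li - 1 := by
                rcases Nat.lt_or_ge k (li-1) with h2 | h2
                · exact h2
                · exfalso; have : k = li - 1 := by omega
                  subst this; exact hxA rfl
              rw [keyL k hk (by omega)]
              have := smono vs hsorted hk hlen hkli
              omega
            · have hkj : j < k := by
                rcases Nat.lt_or_ge j k with h2 | h2
                · exact h2
                · exfalso; have : k = j := by omega
                  subst this; exact hxB rfl
              rw [keyR k hk (by omega)]
              have := smono vs hsorted hjn hk hkj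
              omega
          rcases Nat.lt_or_ge (hs.idxOf (vs[li-1])) (hs.idxOf (vs[j])) with hord | hord
          · have hfa : first.getD (vs[li-1]) 0 < first.getD (vs[j]) 0 := by
              rw [hf _ hAhs, hf _ hBhs]
              exact_mod_cast hord
            rw [if_pos (by
              simp only [Bool.or_eq_true, Bool.and_eq_true, decide_eq_true_eq]
              exact Or.inr ⟨by omega, hfa⟩)]
            have hsel : PySem.List.min? (hs.filter (fun x => inS vs li j x)) (fun x => |x - p|)
                = some (vs[li-1]) := by
              apply sel_tie _ _ _ hs _ hAS hBS hAhs hBhs hABne (by omega) hu2 hord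
            rw [doLeft hsel, hc _ hAhs, Int.toNat_natCast]
          · have hord' : hs.idxOf (vs[j]) < hs.idxOf (vs[li-1]) := by omega
            have hfb : ¬ (first.getD (vs[li-1]) 0 < first.getD (vs[j]) 0) := by
              rw [hf _ hAhs, hf _ hBhs]
              have hcast : ((hs.idxOf (vs[j])) : Int) < ((hs.idxOf (vs[li-1])) : Int) := by
                exact_mod_cast hord'
              omega
            rw [if_neg (by
              simp only [Bool.or_eq_true, Bool.and_eq_true, decide_eq_true_eq]
              rintro (h | ⟨h1, h2⟩)
              · omega
              · exact hfb h2)]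
            have hsel : PySem.List.min? (hs.filter (fun x => inS vs li j x)) (fun x => |x - p|)
                = some (vs[j]) := by
              apply sel_tie _ _ _ hs _ hBS hAS hBhs hAhs (Ne.symm hABne) (by omega) ?_ hord'
              intro x hx hxB hxA
              have := hu2 x hx hxA hxB
              omega
            rw [doRight hsel, hc _ hBhs, Int.toNat_natCast]
        · -- dr < dl : take right, unique
          rw [if_neg (by
            simp only [Bool.or_eq_true, Bool.and_eq_true, decide_eq_true_eq]
            rintro (h | ⟨h1, h2⟩) <;> omega)]
          have hsel : PySem.List.min? (hs.filter (fun x => inS vs li j x)) (fun x => |x - p|)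
              = some (vs[j]) := by
            apply sel_unique _ _ _ hB0
            intro x hx hxv
            obtain ⟨k, hk, rfl, hcase⟩ := rdec x hx
            rw [keyR j hjn le_rfl]
            rcases hcase with h | h
            · rw [keyL k hk h]
              have : vs[k] ≤ vs[li-1] := by
                rcases Nat.lt_or_ge k (li-1) with h2 | h2
                · exact le_of_lt (smono vs hsorted hk hlen h2)
                · have : k = li - 1 := by omega
                  subst this; exact le_rfl
              omega
            · have hkj : j < k := by
                rcases Nat.lt_or_ge j k with h2 | h2
                · exact h2
                · exfalso; have : k = j := by omega
                  subst this; exact hxv rfl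
              rw [keyR k hk (by omega)]
              have := smono vs hsorted hjn hk hkj
              omega
          rw [doRight hsel, hc _ hBhs, Int.toNat_natCast]
      · -- C2 : j = vs.length, take left, unique
        have hjeq : j = vs.length := by omega
        have hsel : PySem.List.min? (hs.filter (fun x => inS vs li j x)) (fun x => |x - p|)
            = some (vs[li-1]) := by
          apply sel_unique _ _ _ hAr
          intro x hx hxv
          obtain ⟨k, hk, rfl, hcase⟩ := rdec x hx
          rw [keyL (li-1) hlen (by omega)]
          rcases hcase with h | h
          · have hkli : k < li - 1 := by
              rcases Nat.lt_or_ge k (li-1) with h2 | h2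
              · exact h2
              · exfalso; have : k = li - 1 := by omega
                subst this; exact hxv rfl
            rw [keyL k hk (by omega)]
            have := smono vs hsorted hk hlen hkli
            omega
          · omega
        simp only [greedyGoB]
        rw [if_pos hguard]
        rw [if_neg (by omega : ¬ ((li:Int) - 1 < 0)), if_pos (by omega : vs.length ≤ j)]
        rw [if_pos rfl]
        rw [show ((li:Int) - 1).toNat = li - 1 from by omega]
        rw [List.getD_eq_getElem vs 0 hlen]
        rw [doLeft hsel, hc _ hAhs, Int.toNat_natCast]

theorem foldl_pair_split {γ : Type} (f g : PySem.Dict Int Int → γ → PySem.Dict Int Int) :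
    ∀ (l : List γ) (a b : PySem.Dict Int Int),
    l.foldl (fun s x => (f s.1 x, g s.2 x)) (a, b) = (l.foldl f a, l.foldl g b) := by
  intro l
  induction l with
  | nil => intro a b; rfl
  | cons x t ih => intro a b; simp only [List.foldl_cons]; exact ih _ _

theorem enumerate_map_snd : ∀ (l : List Int) (k : Int),
    (PySem.List.enumerate l k).map Prod.snd = l := by
  intro l
  induction l with
  | nil => intro k; rw [PySem.List.enumerate]; simp
  | cons x t ih => intro k; rw [PySem.List.enumerate]; simp [ih]

theorem count_getD (v : Int) : ∀ (l : List (Int × Int)) (d : PySem.Dict Int Int),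
    (l.foldl (fun d iv => d.insert iv.2 (d.getD iv.2 0 + 1)) d).getD v 0
      = d.getD v 0 + ((l.map Prod.snd).count v : Int) := by
  intro l
  induction l with
  | nil => intro d; simp
  | cons iv t ih =>
    intro d
    rw [List.foldl_cons, ih]
    rw [PySem.Dict.getD_insert]
    by_cases h : v = iv.2
    · rw [if_pos h, List.map_cons, List.count_cons]
      simp [h]
      push_cast
      omega
    · rw [if_neg h, List.map_cons, List.count_cons]
      have : (iv.2 == v) = false := by simp [Ne.symm h]
      simp [this]

theorem first_getD_stable (v : Int) : ∀ (l : List (Int × Int)) (d : PySem.Dict Int Int),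
    d.contains v = true →
    (l.foldl (fun d iv => if d.contains iv.2 then d else d.insert iv.2 iv.1) d).getD v 0
      = d.getD v 0 := by
  intro l
  induction l with
  | nil => intro d _; rfl
  | cons iv t ih =>
    intro d hd
    rw [List.foldl_cons]
    by_cases h : d.contains iv.2
    · rw [if_pos h, ih d hd]
    · rw [if_neg h]
      have hne : iv.2 ≠ v := by intro he; rw [he] at h; exact h hd
      rw [ih _ (by rw [PySem.Dict.contains_insert]; simp [hd])]
      rw [PySem.Dict.getD_insert]
      rw [if_neg (fun he => hne he.symm)]

theorem first_getD (v : Int) : ∀ (l : List Int) (k : Int) (d : PySem.Dict Int Int),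
    d.contains v = false → v ∈ l →
    ((PySem.List.enumerate l k).foldl
        (fun d iv => if d.contains iv.2 then d else d.insert iv.2 iv.1) d).getD v 0
      = k + (l.idxOf v : Int) := by
  intro l
  induction l with
  | nil => intro k d _ hv; simp at hv
  | cons x t ih =>
    intro k d hd hv
    rw [PySem.List.enumerate, List.foldl_cons]
    by_cases hx : x = v
    · rw [if_neg (by simp [hx, hd])]
      rw [hx]
      rw [first_getD_stable v (PySem.List.enumerate t (k+1)) (d.insert (k, v).2 (k, v).1)
        (by simp [PySem.Dict.contains_insert])]
      simp only []
      rw [PySem.Dict.getD_insert, if_pos rfl, List.idxOf_cons_self]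
      simp
    · have hvt : v ∈ t := by
        rcases List.mem_cons.mp hv with h | h
        · exact absurd h.symm hx
        · exact h
      have step_ncont : ∀ d' : PySem.Dict Int Int, d'.contains v = false →
          ((if d'.contains x then d' else d'.insert x k) : PySem.Dict Int Int).contains v = false := by
        intro d' hd'
        by_cases h : d'.contains x
        · rw [if_pos h]; exact hd'
        · rw [if_neg h, PySem.Dict.contains_insert]
          simp [hd', hx]
          intro he; exact hx he.symm
      rw [ih (k+1) _ (step_ncont d hd) hvt]
      rw [List.idxOf_cons_ne t (fun he => hx he)]
      push_cast
      omega

theorem findJ_spec (vs : List Int) : ∀ (n j : Nat), vs.length - j ≤ n →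
    (j ≤ findJ n vs j ∧ (j ≤ vs.length → findJ n vs j ≤ vs.length)
      ∧ (∀ (k : Nat) (hk : k < vs.length), j ≤ k → k < findJ n vs j → vs[k] < 0)
      ∧ (∀ (h : findJ n vs j < vs.length), 0 ≤ vs[findJ n vs j])) := by
  intro n
  induction n with
  | zero =>
    intro j hn
    have hj : vs.length ≤ j := by omega
    simp only [findJ]
    exact ⟨le_rfl, fun h => h, fun k hk h1 h2 => by omega,
      fun h => absurd h (by omega)⟩
  | succ n ih =>
    intro j hn
    simp only [findJ]
    by_cases hcond : j < vs.length ∧ vs.getD j 0 < 0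
    · simp only [if_pos hcond]
      obtain ⟨ha, hb, hc', hd⟩ := ih (j+1) (by omega)
      refine ⟨by omega, fun _ => hb (by omega), ?_, hd⟩
      intro k hk h1 h2
      rcases Nat.lt_or_ge j k with h3 | h3
      · exact hc' k hk (by omega) h2
      · have : k = j := by omega
        subst this
        rw [← List.getD_eq_getElem vs 0 hk]
        exact hcond.2
    · simp only [if_neg hcond]
      refine ⟨le_rfl, fun h => ?_, fun k hk h1 h2 => by omega, fun h => ?_⟩
      · rcases Nat.lt_or_ge j vs.length with h2 | h2
        · exact le_of_lt h2
        · exact h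
      · rcases Nat.lt_or_ge j vs.length with h2 | h2
        · have : ¬ vs.getD j 0 < 0 := by
            intro hlt; exact hcond ⟨h2, hlt⟩
          rw [← List.getD_eq_getElem vs 0 h]
          omega
        · exact absurd h (by omega)

theorem main_eq (houses : List Int) : greedy_order houses = greedy_order_alt houses := by
  unfold greedy_order greedy_order_alt
  simp only []
  rw [foldl_pair_split (fun d iv => if d.contains iv.2 then d else d.insert iv.2 iv.1)
    (fun d iv => d.insert iv.2 (d.getD iv.2 0 + 1)) (PySem.List.enumerate houses 0)
    PySem.Dict.empty PySem.Dict.empty]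
  simp only []
  set Fd := (PySem.List.enumerate houses 0).foldl
    (fun d iv => if d.contains iv.2 then d else d.insert iv.2 iv.1) PySem.Dict.empty with hFd
  set Cd := (PySem.List.enumerate houses 0).foldl
    (fun d iv => d.insert iv.2 (d.getD iv.2 0 + 1))
    (PySem.Dict.empty : PySem.Dict Int Int) with hCd
  have hkeys : Cd.keys = PySem.Set.ofList houses := by
    rw [hCd, PySem.Dict.keys_foldl_insert_key (PySem.List.enumerate houses 0) Prod.snd
      (fun d iv => d.getD iv.2 0 + 1) (PySem.Dict.empty : PySem.Dict Int Int)]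
    rw [PySem.Dict.keys_empty, PySem.Set.update_nil_left, enumerate_map_snd]
  set vs := PySem.List.sorted Cd.keys (fun x => x) false with hvs
  have hsorted : vs.Pairwise (· < ·) := by
    rw [hvs, hkeys]
    exact PySem.List.sorted_ofList_pairwise_lt houses
  have hmem : ∀ x : Int, x ∈ vs ↔ x ∈ houses := by
    intro x
    rw [hvs, PySem.List.mem_sorted, hkeys]
    exact PySem.Set.mem_ofList houses x
  have hfst : ∀ v ∈ houses, Fd.getD v 0 = (houses.idxOf v : Int) := by
    intro v hv
    rw [hFd, first_getD v houses 0 PySem.Dict.empty (by simp) hv]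
    omega
  have hcnt : ∀ v ∈ houses, Cd.getD v 0 = (houses.count v : Int) := by
    intro v _
    rw [hCd, count_getD v (PySem.List.enumerate houses 0)
      (PySem.Dict.empty : PySem.Dict Int Int), enumerate_map_snd]
    simp
  obtain ⟨h1, h2, h3, h4⟩ := findJ_spec vs vs.length 0 (by omega)
  have hj0 : findJ vs.length vs 0 ≤ vs.length := h2 (by omega)
  have hfull : houses.filter
      (fun x => inS vs (findJ vs.length vs 0) (findJ vs.length vs 0) x) = houses := by
    apply List.filter_eq_self.mpr
    intro a ha
    obtain ⟨k, hk, hka⟩ := List.mem_iff_getElem.mp ((hmem a).mpr ha)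
    exact (inS_iff vs _ _ a).mpr ⟨k, hk, hka, by omega⟩
  have hgoal := goA_goB houses vs Fd Cd hsorted hmem hfst hcnt (vs.length + 1)
    (findJ vs.length vs 0) (findJ vs.length vs 0) 0
    (by omega) le_rfl hj0
    (fun k hk hkj => h3 k hk (by omega) hkj)
    (fun k hk hkj => by
      rcases Nat.lt_or_ge (findJ vs.length vs 0) k with h5 | h5
      · exact le_trans (h4 (by omega)) (le_of_lt (smono vs hsorted (by omega) hk h5))
      · have : k = findJ vs.length vs 0 := by omega
        subst this
        exact h4 hk)
  rw [hfull] at hgoal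
  exact hgoal

-- ===== VERDICT (by name: the statement is the Claim_ definition above) =====
theorem greedy_order_spec : Claim_equal_greedy_order := by
  intro houses _
  unfold Spec_greedy_order
  exact main_eq houses
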